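-- pv_equiv track=rewrite | github.com/MDGSF/StudySpark | basic_spark/chapter07/reduceByKey.py | cleanWordRDDFilter
-- ===== SOURCE A (Python) =====
-- def cleanWordRDDFilter(s):
--     parts = s.split("-")
--     if len(parts) != 2:
--         return False
--     invalid_chars = {"&", "|", "#", "^", "@", ";"}
--     for part in parts:
--         if not part or any(c in invalid_chars for c in part):
--             return False
--     return True
-- ===== SOURCE B (Python) =====
-- def cleanWordRDDFilter(s):
--     # exactly one dash => exactly two parts
--     if s.count("-") != 1:
--         return False
--     # a part is empty only when the single dash is leading or trailing
--     if s[0] == "-" or s[-1] == "-":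
--         return False
--     # '-' itself is never invalid, so scan the whole string once
--     return not any(c in "&|#^@;" for c in s)
-- ===== Notes on version B (the rewrite author's own statement) =====
-- stated objective: alternative
-- what changed: Replaces the split-into-two-parts loop by dash-counting plus positional boundary checks and a single whole-string scan for invalid characters.
import Mathlib
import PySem

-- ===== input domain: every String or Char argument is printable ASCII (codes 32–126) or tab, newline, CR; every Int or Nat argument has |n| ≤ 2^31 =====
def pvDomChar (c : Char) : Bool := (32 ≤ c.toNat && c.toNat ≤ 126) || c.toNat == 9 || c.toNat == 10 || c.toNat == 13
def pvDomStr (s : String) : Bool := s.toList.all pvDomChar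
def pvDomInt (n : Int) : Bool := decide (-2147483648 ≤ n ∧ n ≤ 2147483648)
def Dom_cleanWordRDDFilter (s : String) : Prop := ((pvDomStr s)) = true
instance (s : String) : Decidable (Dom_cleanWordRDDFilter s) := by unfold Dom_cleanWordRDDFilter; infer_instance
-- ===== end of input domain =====

-- B validates the two-part format without splitting: count the dashes, reject a leading/trailing dash,
-- then scan the whole string once for invalid characters (alternative decomposition, same cost).


-- ===== PORT A =====
-- invalid_chars = {"&", "|", "#", "^", "@", ";"}  (a set literal of distinct chars; membership test only)
def pvInvalidCharsA : List Char := ['&', '|', '#', '^', '@', ';']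

-- parts = s.split("-"); len check; for part in parts: empty-or-invalid-char check with early False
def cleanWordRDDFilter (s : String) : Bool :=
  let parts := PySem.Chars.splitOn s.toList "-".toList
  if parts.length ≠ 2 then false
  else !(parts.any (fun part => part.isEmpty || part.any (fun c => pvInvalidCharsA.contains c)))

-- ===== PORT B =====
def cleanWordRDDFilter_alt (s : String) : Bool :=
  if PySem.Str.count s "-" ≠ 1 then false
  else if PySem.Str.pyGet? s 0 == some '-' || PySem.Str.pyGet? s (-1) == some '-' then false
  else !(s.toList.any (fun c => "&|#^@;".toList.contains c))

-- ===== PRECONDITION & SPEC =====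
def Spec_cleanWordRDDFilter (s : String) (out : Bool) : Prop := out = cleanWordRDDFilter_alt s
instance (s : String) (out : Bool) : Decidable (Spec_cleanWordRDDFilter s out) := by unfold Spec_cleanWordRDDFilter; infer_instance

-- ===== CLAIM (what is proved, stated in full; the proofs are below) =====
def Claim_equal_cleanWordRDDFilter : Prop := ∀ (s : String), Dom_cleanWordRDDFilter s → Spec_cleanWordRDDFilter s (cleanWordRDDFilter s)

-- ===== LEMMAS AND PROOFS =====

-- Reference one-character split (tail state: reversed current chunk).
def pvRefSplit (d : Char) : List Char → List Char → List (List Char)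
  | [], cur => [cur.reverse]
  | c :: rest, cur => if c = d then cur.reverse :: pvRefSplit d rest [] else pvRefSplit d rest (c :: cur)

theorem pvSplitOn_go_spec (d : Char) (cs cur : List Char) (acc : List (List Char)) (fuel : Nat)
    (h : cs.length < fuel) :
    PySem.Chars.splitOn.go [d] fuel cs cur acc = acc.reverse ++ pvRefSplit d cs cur := by
  induction cs generalizing fuel cur acc with
  | nil =>
    cases fuel with
    | zero => omega
    | succ f => simp [PySem.Chars.splitOn.go, pvRefSplit]
  | cons c rest ih =>
    cases fuel with
    | zero => omega
    | succ f =>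
      rw [PySem.Chars.splitOn.go]
      by_cases hc : c = d
      · subst hc
        rw [if_pos (by simp : ([c].isPrefixOf (c :: rest)) = true)]
        simp only [List.length_cons, List.length_nil, Nat.zero_add, List.drop_succ_cons,
          List.drop_zero]
        rw [ih [] (cur.reverse :: acc) f (by simp at h; omega)]
        simp [pvRefSplit]
      · rw [if_neg (by simp [List.isPrefixOf_cons₂]; exact fun h' => hc h'.symm)]
        rw [ih (c :: cur) acc f (by simp at h; omega)]
        simp [pvRefSplit, hc]

theorem pvSplitOn_eq (d : Char) (cs : List Char) :
    PySem.Chars.splitOn cs [d] = pvRefSplit d cs [] := by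
  rw [PySem.Chars.splitOn, pvSplitOn_go_spec d cs [] [] (cs.length + 1) (by omega)]
  rfl

theorem pvCount_go_spec (d : Char) (cs : List Char) (acc fuel : Nat)
    (h : cs.length ≤ fuel) :
    PySem.Chars.count.go [d] fuel cs acc = acc + cs.count d := by
  induction cs generalizing fuel acc with
  | nil =>
    cases fuel with
    | zero => simp [PySem.Chars.count.go]
    | succ f => simp [PySem.Chars.count.go]
  | cons c rest ih =>
    cases fuel with
    | zero => simp at h
    | succ f =>
      rw [PySem.Chars.count.go]
      by_cases hc : c = d
      · subst hc
        rw [if_pos (by simp : ([c].isPrefixOf (c :: rest)) = true)]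
        simp only [List.length_cons, List.length_nil, Nat.zero_add, List.drop_succ_cons,
          List.drop_zero]
        rw [ih (acc + 1) f (by simp at h; omega)]
        simp
        omega
      · rw [if_neg (by simp [List.isPrefixOf_cons₂]; exact fun h' => hc h'.symm)]
        rw [ih acc f (by simp at h; omega)]
        simp [hc]

theorem pvCount_eq (d : Char) (cs : List Char) :
    PySem.Chars.count cs [d] = cs.count d := by
  rw [PySem.Chars.count]
  simp [pvCount_go_spec d cs 0 cs.length le_rfl]

theorem pvRefSplit_length (d : Char) (cs cur : List Char) :
    (pvRefSplit d cs cur).length = cs.count d + 1 := by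
  induction cs generalizing cur with
  | nil => simp [pvRefSplit]
  | cons c rest ih =>
    by_cases hc : c = d
    · subst hc; simp [pvRefSplit, ih]
    · simp [pvRefSplit, hc, ih]

theorem pvRefSplit_no_sep (d : Char) (cs cur : List Char) (h : d ∉ cs) :
    pvRefSplit d cs cur = [cur.reverse ++ cs] := by
  induction cs generalizing cur with
  | nil => simp [pvRefSplit]
  | cons c rest ih =>
    have hc : c ≠ d := fun hc => h (hc ▸ List.mem_cons_self)
    rw [pvRefSplit, if_neg hc, ih _ (fun hm => h (List.mem_cons_of_mem _ hm))]
    simp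

theorem pvRefSplit_append (d : Char) (a b cur : List Char) (h : d ∉ a) :
    pvRefSplit d (a ++ d :: b) cur = (cur.reverse ++ a) :: pvRefSplit d b [] := by
  induction a generalizing cur with
  | nil => simp [pvRefSplit]
  | cons x a' ih =>
    have hx : x ≠ d := fun hx => h (hx ▸ List.mem_cons_self)
    rw [List.cons_append, pvRefSplit, if_neg hx, ih _ (fun hm => h (List.mem_cons_of_mem _ hm))]
    simp

theorem pvCount_one_decomp (d : Char) (cs : List Char) (h : cs.count d = 1) :
    ∃ a b, cs = a ++ d :: b ∧ d ∉ a ∧ d ∉ b := by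
  induction cs with
  | nil => simp at h
  | cons c rest ih =>
    by_cases hc : c = d
    · subst hc
      refine ⟨[], rest, by simp, by simp, ?_⟩
      simp at h
      intro hm
      exact absurd (List.count_pos_iff.mpr hm) (by omega)
    · simp [hc] at h
      obtain ⟨a, b, rfl, ha, hb⟩ := ih h
      exact ⟨c :: a, b, rfl, by simp [ha]; exact fun h' => hc h'.symm, hb⟩

-- ===== VERDICT (by name: the statement is the Claim_ definition above) =====
theorem cleanWordRDDFilter_spec : Claim_equal_cleanWordRDDFilter := by
  intro s _
  unfold Spec_cleanWordRDDFilter cleanWordRDDFilter cleanWordRDDFilter_alt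
  have hdash : "-".toList = ['-'] := rfl
  have hcnt : PySem.Str.count s "-" = s.toList.count '-' := by
    simp [PySem.Str.count_eq, hdash, pvCount_eq]
  rw [hdash, pvSplitOn_eq, hcnt]
  by_cases h1 : s.toList.count '-' = 1
  · obtain ⟨a, b, hab, ha, hb⟩ := pvCount_one_decomp '-' s.toList h1
    rw [hab, pvRefSplit_append '-' a b [] ha, pvRefSplit_no_sep '-' b [] hb]
    have hget0 : PySem.Str.pyGet? s 0 = s.toList[0]? := by
      simp [PySem.List.pyGet?_zero]
    have hgetl : PySem.Str.pyGet? s (-1) = s.toList.getLast? := by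
      simp; rw [PySem.List.pyGet?_neg_one]
    rw [hget0, hgetl, hab]
    rcases a with _ | ⟨x, a'⟩
    · simp
    · rcases b.eq_nil_or_concat with rfl | ⟨ys, y, rfl⟩
      · have hlast : (x :: (a' ++ ['-'])).getLast? = some '-' := by
          rw [show x :: (a' ++ ['-']) = (x :: a') ++ ['-'] from by simp, List.getLast?_concat]
        simp [hlast]
      · have hx : x ≠ '-' := fun hx => ha (hx ▸ List.mem_cons_self)
        have hy : y ≠ '-' := fun hy => hb (hy ▸ (by simp))
        have hlast : (x :: (a' ++ '-' :: (ys ++ [y]))).getLast? = some y := by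
          rw [show x :: (a' ++ '-' :: (ys ++ [y])) = (x :: a' ++ '-' :: ys) ++ [y] from by simp,
            List.getLast?_concat]
        have hca : List.count '-' a' = 0 :=
          List.count_eq_zero.mpr (fun hm => ha (List.mem_cons_of_mem _ hm))
        have hcys : List.count '-' ys = 0 :=
          List.count_eq_zero.mpr (fun hm => hb (by simp [hm]))
        have hne : (ys ++ [y]).isEmpty = false := by simp
        simp [hx, hy, hlast, hca, hcys, hne, pvInvalidCharsA, List.any_append, Bool.and_assoc]
  · have hlen : (pvRefSplit '-' s.toList []).length = s.toList.count '-' + 1 :=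
      pvRefSplit_length '-' s.toList []
    rw [if_pos (show (pvRefSplit '-' s.toList []).length ≠ 2 by rw [hlen]; omega),
        if_pos (show s.toList.count '-' ≠ 1 from h1)]
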